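-- pv_equiv track=rewrite | github.com/karrlopezz/dsc20_HW | hw03.py | change_input_even_more
-- ===== SOURCE A (Python) =====
-- def change_input_even_more(strange_list):
--     """
--     For each string in list, doubles the digits, puts them at the end
--     and capitalizes letters that are lowercase
--     --
--     Parameters:
--     strange_list: list of strings using digits and letters
--     --
--     Returns:
--     new list of modified strings
--
--     >>> change_input_even_more(["3.14IS PIE", "11My aGe iS"])
--     ['.IS PIE628', 'My AGE IS22']
--     >>> change_input_even_more(["go t6o sleep at ", \
--         "5i like to start work before "])
--     ['gO tO slEEp At 12', 'I lIkE tO stArt wOrk bEfOrE 10']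
--     >>> change_input_even_more("11My aGe iS")
--     Traceback (most recent call last):
--     ...
--     AssertionError
--
--     >>> change_input_even_more("11My aGe iS")
--     Traceback (most recent call last):
--     ...
--     AssertionError
--
--     >>> change_input_even_more(["11My aGe iS"])
--     ['My AGE IS22']
--
--     >>> change_input_even_more(['aeiou99'])
--     ['AEIOU1818']
--
--     >>> change_input_even_more(['00'])
--     ['00']
--     """
--     assert isinstance(strange_list, list)
--     assert all(isinstance(string, str) for string in strange_list)
--     return [
--     ''.join([char.upper() if char in 'aeiou' else char for char in
--         string if not char.isdigit()]) + ''.join([str(int(char) * 2)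
--         for char in string if char.isdigit()
--         ]) for string in strange_list]
-- ===== SOURCE B (Python) =====
-- def change_input_even_more(strange_list):
--     assert isinstance(strange_list, list)
--     assert all(isinstance(string, str) for string in strange_list)
--
--     def transform(ch):
--         if ch.isdigit():
--             return str(int(ch) * 2)
--         return ch.upper() if ch in 'aeiou' else ch
--
--     # A stable sort keyed on the digit-flag moves all digits behind all
--     # non-digits while preserving relative order within each group, which is
--     # exactly the reordering A achieves with two filtered passes.
--     return [''.join(map(transform, sorted(string, key=str.isdigit)))
--             for string in strange_list]
-- ===== Notes on version B (the rewrite author's own statement) =====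
-- stated objective: alternative
-- what changed: Instead of A's two filtered comprehensions that partition each string into non-digits and digits, B stably sorts each string's characters by the boolean key str.isdigit (digits sink to the end, relative order preserved) and then applies a single per-character transform (double digits, uppercase vowels) over the sorted sequence.
import Mathlib
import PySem

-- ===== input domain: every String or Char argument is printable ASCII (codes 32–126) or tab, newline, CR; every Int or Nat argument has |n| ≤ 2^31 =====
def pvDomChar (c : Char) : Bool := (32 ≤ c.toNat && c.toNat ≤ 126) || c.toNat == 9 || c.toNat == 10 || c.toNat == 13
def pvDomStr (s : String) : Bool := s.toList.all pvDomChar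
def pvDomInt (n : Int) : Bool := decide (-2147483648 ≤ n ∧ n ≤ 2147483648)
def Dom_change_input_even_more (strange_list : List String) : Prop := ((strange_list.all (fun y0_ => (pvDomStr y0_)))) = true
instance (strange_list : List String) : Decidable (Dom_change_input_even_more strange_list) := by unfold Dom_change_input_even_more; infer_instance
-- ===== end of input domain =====

-- B replaces A's two filtered comprehensions per string with a stable sort of the
-- characters keyed on the digit flag followed by one per-character transform;
-- alternative algorithm, same observable result.

-- shared per-character primitives (both Pythons use char.isdigit / upper-if-vowel / str(int(char)*2))
-- char.isdigit() on a single character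
def pvIsDigit (c : Char) : Bool := PySem.Chars.isdigit c
-- char.upper() if char in 'aeiou' else char  (char.upper() is a string; kept as List Char)
def pvUpperVowel (c : Char) : List Char :=
  if c ∈ "aeiou".toList then PySem.Chars.upper [c] else [c]
-- str(int(char) * 2); the guard guarantees char is a digit, so int(char) never raises
def pvDouble (c : Char) : List Char :=
  PySem.Int.toChars (((PySem.Int.ofChars? [c]).getD 0) * 2)

-- ===== PORT A =====

def change_input_even_more (strange_list : List String) : List String :=
  strange_list.map (fun s =>
    String.ofList
      ((((s.toList.filter (fun c => !(pvIsDigit c))).map pvUpperVowel).flatten)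
        ++ (((s.toList.filter (fun c => pvIsDigit c)).map pvDouble).flatten)))

-- ===== PORT B =====
-- the per-character transform of Source B
def pvTransform (c : Char) : List Char :=
  if pvIsDigit c then pvDouble c else pvUpperVowel c

-- sorted(string, key=str.isdigit): Python's bool key False < True ports as Nat 0 < 1
def pvKey (c : Char) : Nat := if pvIsDigit c then 1 else 0

def change_input_even_more_alt (strange_list : List String) : List String :=
  strange_list.map (fun s =>
    String.ofList (((PySem.List.sorted s.toList pvKey).map pvTransform).flatten))

-- ===== PRECONDITION & SPEC =====
def Spec_change_input_even_more (strange_list : List String) (out : List String) : Prop := out = change_input_even_more_alt strange_list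
instance (strange_list : List String) (out : List String) : Decidable (Spec_change_input_even_more strange_list out) := by unfold Spec_change_input_even_more; infer_instance

-- ===== CLAIM (what is proved, stated in full; the proofs are below) =====
def Claim_equal_change_input_even_more : Prop := ∀ (strange_list : List String), Dom_change_input_even_more strange_list → Spec_change_input_even_more strange_list (change_input_even_more strange_list)

-- ===== LEMMAS AND PROOFS =====

-- insertBy with the digit-flag comparator inserts a non-digit between the
-- letter block and the digit block, and a digit at the very end.
theorem pvInsert_letter (x : Char) (hx : pvIsDigit x = false) :
    ∀ (L D : List Char), (∀ c ∈ L, pvIsDigit c = false) → (∀ c ∈ D, pvIsDigit c = true) →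
    PySem.List.insertBy (fun a b => decide (pvKey a < pvKey b)) x (L ++ D)
      = (L ++ [x]) ++ D := by
  intro L
  induction L with
  | nil =>
    intro D _ hD
    cases D with
    | nil => simp [PySem.List.insertBy]
    | cons d ds =>
      have hd : pvIsDigit d = true := hD d (by simp)
      simp [PySem.List.insertBy, pvKey, hx, hd]
  | cons l ls ih =>
    intro D hL hD
    have hl : pvIsDigit l = false := hL l (by simp)
    have hrec := ih D (fun c hc => hL c (by simp [hc])) hD
    have hb : (decide (pvKey x < pvKey l)) = false := by simp [pvKey, hx, hl]
    simp only [List.cons_append, PySem.List.insertBy, hb, Bool.false_eq_true, if_false, hrec]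

theorem pvInsert_digit (x : Char) (hx : pvIsDigit x = true) (ys : List Char) :
    PySem.List.insertBy (fun a b => decide (pvKey a < pvKey b)) x ys = ys ++ [x] := by
  apply PySem.List.insertBy_of_forall_not_before
  intro y _
  simp [pvKey, hx]
  split_ifs <;> omega

-- loop invariant of the insertion sort: the accumulator stays a letter block
-- followed by a digit block, each extended in original order
theorem pvSort_foldl (cs : List Char) :
    ∀ (L D : List Char), (∀ c ∈ L, pvIsDigit c = false) → (∀ c ∈ D, pvIsDigit c = true) →
    cs.foldl (fun acc x => PySem.List.insertBy (fun a b => decide (pvKey a < pvKey b)) x acc) (L ++ D)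
      = (L ++ cs.filter (fun c => !(pvIsDigit c))) ++ (D ++ cs.filter (fun c => pvIsDigit c)) := by
  induction cs with
  | nil => intro L D _ _; simp
  | cons c cs ih =>
    intro L D hL hD
    by_cases hc : pvIsDigit c = true
    · have h1 := pvInsert_digit c hc (L ++ D)
      have h2 := ih L (D ++ [c]) hL
        (fun x hx => by rcases List.mem_append.mp hx with h | h
                        · exact hD x h
                        · simp_all)
      simp only [List.foldl_cons, h1, List.append_assoc] at *
      simp [h2, hc]
    · have hc' : pvIsDigit c = false := by simp_all
      have h1 := pvInsert_letter c hc' L D hL hD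
      have h2 := ih (L ++ [c]) D
        (fun x hx => by rcases List.mem_append.mp hx with h | h
                        · exact hL x h
                        · simp_all) hD
      simp only [List.foldl_cons, h1]
      simpa [hc', List.append_assoc] using h2

-- sorted(s, key=isdigit-flag) is: non-digits in order, then digits in order
theorem pvSorted_eq (cs : List Char) :
    PySem.List.sorted cs pvKey
      = cs.filter (fun c => !(pvIsDigit c)) ++ cs.filter (fun c => pvIsDigit c) := by
  rw [PySem.List.sorted_eq_foldl_insertBy]
  simpa using pvSort_foldl cs [] [] (by simp) (by simp)

-- ===== VERDICT (by name: the statement is the Claim_ definition above) =====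
theorem change_input_even_more_spec : Claim_equal_change_input_even_more := by
  intro strange_list _
  unfold Spec_change_input_even_more change_input_even_more change_input_even_more_alt
  refine List.map_congr_left (fun s _ => ?_)
  rw [pvSorted_eq, List.map_append, List.flatten_append]
  have h1 : (s.toList.filter (fun c => !(pvIsDigit c))).map pvTransform
      = (s.toList.filter (fun c => !(pvIsDigit c))).map pvUpperVowel :=
    List.map_congr_left (fun c hc => by
      have := (List.mem_filter.mp hc).2
      simp only [Bool.not_eq_eq_eq_not, Bool.not_true] at this
      simp [pvTransform, this])
  have h2 : (s.toList.filter (fun c => pvIsDigit c)).map pvTransform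
      = (s.toList.filter (fun c => pvIsDigit c)).map pvDouble :=
    List.map_congr_left (fun c hc => by
      have := (List.mem_filter.mp hc).2
      simp [pvTransform, this])
  rw [h1, h2]
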